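-- pv_equiv track=rewrite | github.com/argriffing/p53pipe | reduce.py | get_codon_aa_distance_table
-- ===== SOURCE A (Python) =====
-- def hamming_distance(a, b):
--     return sum(1 for x, y in zip(a, b) if x != y)
--
-- def get_codon_aa_distance_table(codon_aa_pairs):
--     """
--     Get a table mapping (codon, aa) to a distance between 0 and 3
--
--     The distance is the minimum number of nucleotide sites within the
--     input codon that must be changed to reach a codon that codes for the
--     output amino acid.
--
--     """
--     codon_to_aa = dict(codon_aa_pairs)
--     codons = set(codon_to_aa)
--     codon_aa_distance = {}
--     for ca in codons:
--         for cb in codons: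
--             edge = ca, codon_to_aa[cb]
--             d = hamming_distance(ca, cb)
--             best = codon_aa_distance.get(edge, d)
--             codon_aa_distance[edge] = min(best, d)
--     return codon_aa_distance
-- ===== SOURCE B (Python) =====
-- def hamming_distance(a, b):
--     return len([1 for x, y in zip(a, b) if x != y])
--
-- def get_codon_aa_distance_table(codon_aa_pairs):
--     codon_to_aa = dict(codon_aa_pairs)
--     aa_to_codons = {}
--     for c, aa in codon_to_aa.items():
--         aa_to_codons[aa] = aa_to_codons.get(aa, []) + [c]
--     table = {}
--     for ca in codon_to_aa:
--         for aa, cbs in aa_to_codons.items():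
--             table[(ca, aa)] = min(hamming_distance(ca, cb) for cb in cbs)
--     return table
-- ===== Notes on version B (the rewrite author's own statement) =====
-- stated objective: alternative
-- what changed: B first builds an aa->codons index grouped by amino acid and computes each (codon, aa) entry's minimum hamming distance in one grouped pass, instead of A's flat codon-by-codon double loop that incrementally min-updates a pair-keyed dict.
import Mathlib
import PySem

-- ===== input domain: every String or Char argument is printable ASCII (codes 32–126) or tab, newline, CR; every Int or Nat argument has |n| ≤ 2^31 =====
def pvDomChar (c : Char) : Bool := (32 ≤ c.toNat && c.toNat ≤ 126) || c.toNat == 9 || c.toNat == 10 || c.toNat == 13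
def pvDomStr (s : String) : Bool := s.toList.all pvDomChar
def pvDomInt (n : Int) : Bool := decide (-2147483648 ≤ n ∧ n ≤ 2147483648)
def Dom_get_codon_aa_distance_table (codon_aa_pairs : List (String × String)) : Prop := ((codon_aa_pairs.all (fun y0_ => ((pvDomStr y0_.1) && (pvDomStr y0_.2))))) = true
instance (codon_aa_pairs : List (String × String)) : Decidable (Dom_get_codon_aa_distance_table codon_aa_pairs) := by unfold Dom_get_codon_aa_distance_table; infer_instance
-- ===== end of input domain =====

-- B groups codons by amino acid once and fills each (codon, aa) entry with one grouped minimum,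
-- replacing A's flat double loop with incremental min-updates of a pair-keyed dict (objective: alternative).
-- Python A's dict key ORDER follows CPython's hash-ordered set iteration; dicts are compared as
-- key→value maps (order-insensitive), and under PySem's insertion-ordered set both ports agree exactly.

-- ===== PORT A =====
def hamming_distance (a b : String) : Int :=
  (a.toList.zip b.toList).foldl (fun acc p => if p.1 != p.2 then acc + 1 else acc) 0

def get_codon_aa_distance_table (codon_aa_pairs : List (String × String)) : List (String × String × Int) :=
  let codon_to_aa : PySem.Dict String String := PySem.Dict.ofList codon_aa_pairs
  let codons : List String := PySem.Set.ofList codon_to_aa.keys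
  let codon_aa_distance : PySem.Dict (String × String) Int :=
    codons.foldl (fun tab ca =>
      codons.foldl (fun tab cb =>
        -- codon_to_aa[cb] cannot raise: cb ∈ codon_to_aa.keys, so the "" default is never used
        let edge : String × String := (ca, codon_to_aa.getD cb "")
        let d : Int := hamming_distance ca cb
        let best : Int := tab.getD edge d
        tab.insert edge (min best d)) tab) PySem.Dict.empty
  codon_aa_distance.items.map (fun p => (p.1.1, p.1.2, p.2))

-- ===== PORT B =====
def hamming_distance_alt (a b : String) : Int :=
  (((a.toList.zip b.toList).filter (fun p => p.1 != p.2)).length : Int)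

def get_codon_aa_distance_table_alt (codon_aa_pairs : List (String × String)) : List (String × String × Int) :=
  let codon_to_aa : PySem.Dict String String := PySem.Dict.ofList codon_aa_pairs
  let aa_to_codons : PySem.Dict String (List String) :=
    codon_to_aa.items.foldl (fun g p => g.modify p.2 [] (· ++ [p.1])) PySem.Dict.empty
  let table : PySem.Dict (String × String) Int :=
    codon_to_aa.keys.foldl (fun t ca =>
      aa_to_codons.items.foldl (fun t q =>
        -- min() of a nonempty group (every amino acid in the index has at least one codon)
        t.insert (ca, q.1) ((PySem.List.min? (q.2.map (fun cb => hamming_distance_alt ca cb)) (fun x => x)).getD 0)) t)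
      PySem.Dict.empty
  table.items.map (fun p => (p.1.1, p.1.2, p.2))

-- ===== PRECONDITION & SPEC =====
def Spec_get_codon_aa_distance_table (codon_aa_pairs : List (String × String)) (out : List (String × String × Int)) : Prop := out = get_codon_aa_distance_table_alt codon_aa_pairs
instance (codon_aa_pairs : List (String × String)) (out : List (String × String × Int)) : Decidable (Spec_get_codon_aa_distance_table codon_aa_pairs out) := by unfold Spec_get_codon_aa_distance_table; infer_instance

-- ===== CLAIM (what is proved, stated in full; the proofs are below) =====
def Claim_equal_get_codon_aa_distance_table : Prop := ∀ (codon_aa_pairs : List (String × String)), Dom_get_codon_aa_distance_table codon_aa_pairs → Spec_get_codon_aa_distance_table codon_aa_pairs (get_codon_aa_distance_table codon_aa_pairs)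

-- ===== LEMMAS AND PROOFS =====

theorem pv_ham_aux (l : List (Char × Char)) (acc : Int) :
    l.foldl (fun acc p => if p.1 != p.2 then acc + 1 else acc) acc
      = acc + ((l.filter (fun p => p.1 != p.2)).length : Int) := by
  induction l generalizing acc with
  | nil => simp
  | cons h t ih =>
    simp only [List.foldl_cons, List.filter_cons]
    by_cases hc : (h.1 != h.2) = true
    · rw [if_pos hc, if_pos hc, ih, List.length_cons]; push_cast; ring
    · rw [if_neg hc, if_neg hc, ih]

def pvGroupMin (ca : String) (f : String → String) (cbs : List String) (aa : String) : Int :=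
  (PySem.List.min? ((cbs.filter (fun cb => f cb == aa)).map (fun cb => hamming_distance ca cb)) (fun x => x)).getD 0

def pvRow (ca : String) (f : String → String) (cbs : List String) : List ((String × String) × Int) :=
  (PySem.Set.ofList (cbs.map f)).map (fun aa => ((ca, aa), pvGroupMin ca f cbs aa))

theorem pv_min_append (l : List Int) (x : Int) (h : l ≠ []) :
    (PySem.List.min? (l ++ [x]) (fun y => y)).getD 0
      = min ((PySem.List.min? l (fun y => y)).getD 0) x := by
  obtain ⟨a, t, rfl⟩ := List.exists_cons_of_ne_nil h
  rw [List.cons_append, PySem.List.min?_id_cons, PySem.List.min?_id_cons]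
  simp [List.foldl_append]

-- groupMin over cbs ++ [cb] at aa = f cb, when aa already seen
theorem pv_groupMin_append_mem (ca : String) (f : String → String) (cbs : List String) (cb : String)
    (hmem : f cb ∈ cbs.map f) :
    pvGroupMin ca f (cbs ++ [cb]) (f cb)
      = min (pvGroupMin ca f cbs (f cb)) (hamming_distance ca cb) := by
  unfold pvGroupMin
  rw [List.filter_append, List.filter_cons]
  simp only [beq_self_eq_true, if_pos, List.filter_nil, List.map_append, List.map_cons, List.map_nil]
  apply pv_min_append
  obtain ⟨cb', hcb', hf⟩ := List.mem_map.mp hmem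
  simp only [ne_eq, List.map_eq_nil_iff, List.filter_eq_nil_iff, not_forall]
  exact ⟨cb', hcb', by simp [hf]⟩

theorem pv_groupMin_append_ne (ca : String) (f : String → String) (cbs : List String) (cb : String)
    (aa : String) (hne : aa ≠ f cb) :
    pvGroupMin ca f (cbs ++ [cb]) aa = pvGroupMin ca f cbs aa := by
  unfold pvGroupMin
  rw [List.filter_append, List.filter_cons]
  simp [beq_iff_eq, (Ne.symm hne : ¬ f cb = aa)]

theorem pv_groupMin_append_new (ca : String) (f : String → String) (cbs : List String) (cb : String)
    (hmem : f cb ∉ cbs.map f) :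
    pvGroupMin ca f (cbs ++ [cb]) (f cb) = hamming_distance ca cb := by
  unfold pvGroupMin
  rw [List.filter_append, List.filter_cons]
  have : cbs.filter (fun x => f x == f cb) = [] := by
    rw [List.filter_eq_nil_iff]; intro a ha hq
    exact hmem (List.mem_map.mpr ⟨a, ha, (beq_iff_eq.mp hq)⟩)
  simp [this, PySem.List.min?_id_cons]

theorem pv_innerA (ca : String) (f : String → String) (cbs : List String)
    (tab : PySem.Dict (String × String) Int)
    (hnd : tab.keys.Nodup) (hfresh : ∀ aa, (ca, aa) ∉ tab.keys) :
    (cbs.foldl (fun tab cb =>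
        tab.insert (ca, f cb) (min (tab.getD (ca, f cb) (hamming_distance ca cb)) (hamming_distance ca cb))) tab).items
      = tab.items ++ pvRow ca f cbs := by
  induction cbs using List.reverseRecOn with
  | nil => simp [pvRow, PySem.Set.ofList]
  | append_singleton cbs cb ih =>
    rw [List.foldl_append, List.foldl_cons, List.foldl_nil]
    set T := cbs.foldl (fun tab cb =>
        tab.insert (ca, f cb) (min (tab.getD (ca, f cb) (hamming_distance ca cb)) (hamming_distance ca cb))) tab with hT
    have hitems : T.items = tab.items ++ pvRow ca f cbs := ih
    have hkeysT : T.keys = tab.keys ++ (PySem.Set.ofList (cbs.map f)).map (fun aa => (ca, aa)) := by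
      simp only [PySem.Dict.keys, hitems, List.map_append, pvRow, List.map_map]
      rfl
    by_cases hmem : f cb ∈ cbs.map f
    · -- the amino acid was already seen: overwrite in place with the min
      have hSmem : f cb ∈ PySem.Set.ofList (cbs.map f) := (PySem.Set.mem_ofList _ _).mpr hmem
      have hitem : ((ca, f cb), pvGroupMin ca f cbs (f cb)) ∈ T.items := by
        rw [hitems]
        exact List.mem_append_right _ (List.mem_map.mpr ⟨f cb, hSmem, rfl⟩)
      have hTnd : T.keys.Nodup := by
        rw [hkeysT]
        refine List.Nodup.append hnd ((PySem.Set.nodup_ofList _).map ?_) ?_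
        · intro a b h; simpa using h
        · intro k hk1 hk2
          obtain ⟨aa, _, rfl⟩ := List.mem_map.mp hk2
          exact hfresh aa hk1
      have hget : T.getD (ca, f cb) (hamming_distance ca cb) = pvGroupMin ca f cbs (f cb) :=
        PySem.Dict.getD_of_mem_items T hitem hTnd _
      have hcont : T.contains (ca, f cb) = true := by
        rw [PySem.Dict.contains_eq_decide_mem_keys, decide_eq_true_iff, hkeysT]
        exact List.mem_append_right _ (List.mem_map.mpr ⟨f cb, hSmem, rfl⟩)
      rw [PySem.Dict.items_insert_of_contains T _ hcont, hget, hitems, List.map_append]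
      have h1 : tab.items.map (fun p => if (p.1 == (ca, f cb)) = true then ((ca, f cb), min (pvGroupMin ca f cbs (f cb)) (hamming_distance ca cb)) else p) = tab.items := by
        conv_rhs => rw [← List.map_id tab.items]
        apply List.map_congr_left
        intro p hp
        have hpk : p.1 ∈ tab.keys := List.mem_map.mpr ⟨p, hp, rfl⟩
        have hne : ¬ (p.1 == (ca, f cb)) = true := by
          intro hq; exact hfresh (f cb) (beq_iff_eq.mp hq ▸ hpk)
        simp [hne]
      have h2 : (pvRow ca f cbs).map (fun p => if (p.1 == (ca, f cb)) = true then ((ca, f cb), min (pvGroupMin ca f cbs (f cb)) (hamming_distance ca cb)) else p) = pvRow ca f (cbs ++ [cb]) := by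
        unfold pvRow
        rw [List.map_map, List.map_append]
        simp only [List.map_cons, List.map_nil]
        rw [PySem.Set.ofList_append_singleton, PySem.Set.add_of_mem hSmem]
        apply List.map_congr_left
        intro aa haa
        by_cases haaeq : aa = f cb
        · subst haaeq
          simp only [Function.comp_apply, beq_self_eq_true, if_pos]
          rw [pv_groupMin_append_mem ca f cbs cb hmem]
        · simp only [Function.comp_apply]
          rw [if_neg, pv_groupMin_append_ne ca f cbs cb aa haaeq]
          simp [haaeq]
      rw [h1, h2]
    · -- new amino acid: a fresh key is appended
      have hScont : f cb ∉ PySem.Set.ofList (cbs.map f) := fun h => hmem ((PySem.Set.mem_ofList _ _).mp h)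
      have hcont : T.contains (ca, f cb) = false := by
        rw [PySem.Dict.contains_eq_decide_mem_keys, decide_eq_false_iff_not, hkeysT]
        intro h
        rcases List.mem_append.mp h with h | h
        · exact hfresh (f cb) h
        · obtain ⟨aa, haa, heq⟩ := List.mem_map.mp h
          injection heq with h1 h2; exact hScont (h2 ▸ haa)
      rw [PySem.Dict.items_insert_of_not_contains T _ hcont,
        PySem.Dict.getD_of_not_contains T _ hcont, min_self, hitems, List.append_assoc]
      congr 1
      unfold pvRow
      rw [List.map_append]
      simp only [List.map_cons, List.map_nil]
      rw [PySem.Set.ofList_append_singleton, PySem.Set.add_of_not_mem hScont, List.map_append]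
      congr 1
      · apply List.map_congr_left
        intro aa haa
        rw [pv_groupMin_append_ne ca f cbs cb aa]
        intro h; exact hScont (h ▸ haa)
      · simp only [List.map_cons, List.map_nil]
        rw [pv_groupMin_append_new ca f cbs cb hmem]

theorem pv_outerA (f : String → String) (cbs : List String) (cas : List String)
    (tab : PySem.Dict (String × String) Int)
    (hnd : tab.keys.Nodup) (hcnd : cas.Nodup)
    (hfresh : ∀ ca ∈ cas, ∀ aa, (ca, aa) ∉ tab.keys) :
    (cas.foldl (fun tab ca =>
        cbs.foldl (fun tab cb =>
          tab.insert (ca, f cb) (min (tab.getD (ca, f cb) (hamming_distance ca cb)) (hamming_distance ca cb))) tab) tab).items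
      = tab.items ++ cas.flatMap (fun ca => pvRow ca f cbs) := by
  induction cas generalizing tab with
  | nil => simp
  | cons ca rest ih =>
    rw [List.foldl_cons]
    set T := cbs.foldl (fun tab cb =>
        tab.insert (ca, f cb) (min (tab.getD (ca, f cb) (hamming_distance ca cb)) (hamming_distance ca cb))) tab with hT
    have hfca : ∀ aa, (ca, aa) ∉ tab.keys := hfresh ca (List.mem_cons_self)
    have hitems : T.items = tab.items ++ pvRow ca f cbs := pv_innerA ca f cbs tab hnd hfca
    have hkeysT : T.keys = tab.keys ++ (PySem.Set.ofList (cbs.map f)).map (fun aa => (ca, aa)) := by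
      simp only [PySem.Dict.keys, hitems, List.map_append, pvRow, List.map_map]
      rfl
    have hTnd : T.keys.Nodup := by
      rw [hkeysT]
      refine List.Nodup.append hnd ((PySem.Set.nodup_ofList _).map ?_) ?_
      · intro a b h; simpa using h
      · intro k hk1 hk2
        obtain ⟨aa, _, rfl⟩ := List.mem_map.mp hk2
        exact hfca aa hk1
    have hfr : ∀ ca' ∈ rest, ∀ aa, (ca', aa) ∉ T.keys := by
      intro ca' hca' aa hk
      rw [hkeysT] at hk
      rcases List.mem_append.mp hk with h | h
      · exact hfresh ca' (List.mem_cons_of_mem _ hca') aa h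
      · obtain ⟨aa', _, heq⟩ := List.mem_map.mp h
        injection heq with h1 h2
        exact (List.nodup_cons.mp hcnd).1 (h1 ▸ hca')
    rw [ih T hTnd (List.nodup_cons.mp hcnd).2 hfr, hitems, List.flatMap_cons, List.append_assoc]

theorem pv_group_getD (l : List (String × String)) (g : PySem.Dict String (List String)) (aa : String) :
    (l.foldl (fun g p => g.modify p.2 [] (· ++ [p.1])) g).getD aa []
      = g.getD aa [] ++ (l.filter (fun p => p.2 == aa)).map (·.1) := by
  induction l generalizing g with
  | nil => simp
  | cons p t ih =>
    rw [List.foldl_cons, ih, PySem.Dict.getD_modify, List.filter_cons]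
    by_cases hp : (p.2 == aa) = true
    · have hpe := beq_iff_eq.mp hp
      rw [if_pos hp, if_pos hpe.symm, hpe]
      simp
    · rw [if_neg hp, if_neg (fun h => hp (beq_iff_eq.mpr h.symm))]

theorem pv_outerB (aaItems : List (String × List String)) (cas : List String)
    (tab : PySem.Dict (String × String) Int)
    (hnd : tab.keys.Nodup) (hcnd : cas.Nodup) (hand : (aaItems.map (·.1)).Nodup)
    (hfresh : ∀ ca ∈ cas, ∀ aa, (ca, aa) ∉ tab.keys) :
    (cas.foldl (fun t ca =>
        aaItems.foldl (fun t q =>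
          t.insert (ca, q.1) ((PySem.List.min? (q.2.map (fun cb => hamming_distance_alt ca cb)) (fun x => x)).getD 0)) t) tab).items
      = tab.items ++ cas.flatMap (fun ca =>
          aaItems.map (fun q => ((ca, q.1), (PySem.List.min? (q.2.map (fun cb => hamming_distance_alt ca cb)) (fun x => x)).getD 0))) := by
  induction cas generalizing tab with
  | nil => simp
  | cons ca rest ih =>
    rw [List.foldl_cons]
    set T := aaItems.foldl (fun t q =>
        t.insert (ca, q.1) ((PySem.List.min? (q.2.map (fun cb => hamming_distance_alt ca cb)) (fun x => x)).getD 0)) tab with hT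
    have hfca : ∀ aa, (ca, aa) ∉ tab.keys := hfresh ca (List.mem_cons_self)
    have hitems : T.items = tab.items ++ aaItems.map (fun q => ((ca, q.1), (PySem.List.min? (q.2.map (fun cb => hamming_distance_alt ca cb)) (fun x => x)).getD 0)) := by
      apply PySem.Dict.items_foldl_insert_fresh
      · intro q hq
        rw [PySem.Dict.contains_eq_decide_mem_keys, decide_eq_false_iff_not]
        exact hfca q.1
      · rw [show (fun q : String × List String => (ca, q.1)) = (fun aa => (ca, aa)) ∘ (fun q : String × List String => q.1) from rfl, ← List.map_map]
        exact hand.map (fun a b h => by simpa using h)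
    have hkeysT : T.keys = tab.keys ++ aaItems.map (fun q => (ca, q.1)) := by
      simp only [PySem.Dict.keys, hitems, List.map_append, List.map_map]
      rfl
    have hTnd : T.keys.Nodup := by
      rw [hkeysT]
      refine List.Nodup.append hnd ?_ ?_
      · rw [show (fun q : String × List String => (ca, q.1)) = (fun aa => (ca, aa)) ∘ (fun q : String × List String => q.1) from rfl, ← List.map_map]
        exact hand.map (fun a b h => by simpa using h)
      · intro k hk1 hk2
        obtain ⟨q, _, rfl⟩ := List.mem_map.mp hk2
        exact hfca q.1 hk1
    have hfr : ∀ ca' ∈ rest, ∀ aa, (ca', aa) ∉ T.keys := by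
      intro ca' hca' aa hk
      rw [hkeysT] at hk
      rcases List.mem_append.mp hk with h | h
      · exact hfresh ca' (List.mem_cons_of_mem _ hca') aa h
      · obtain ⟨q, _, heq⟩ := List.mem_map.mp h
        injection heq with h1 h2
        exact (List.nodup_cons.mp hcnd).1 (h1 ▸ hca')
    rw [ih T hTnd (List.nodup_cons.mp hcnd).2 hfr, hitems, List.flatMap_cons, List.append_assoc]

theorem pv_hamming_eq' (a b : String) : hamming_distance a b = hamming_distance_alt a b := by
  unfold hamming_distance hamming_distance_alt
  simpa using pv_ham_aux (a.toList.zip b.toList) 0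

theorem pv_final (codon_aa_pairs : List (String × String)) :
    get_codon_aa_distance_table codon_aa_pairs = get_codon_aa_distance_table_alt codon_aa_pairs := by
  unfold get_codon_aa_distance_table get_codon_aa_distance_table_alt
  simp only []
  set kvs := PySem.Dict.ofList codon_aa_pairs with hkvs
  have hKnd : kvs.keys.Nodup := PySem.Dict.nodup_keys_ofList codon_aa_pairs
  rw [PySem.Set.ofList_eq_self_of_nodup kvs.keys hKnd]
  congr 1
  -- characterize A's table
  have hempnd : (PySem.Dict.empty : PySem.Dict (String × String) Int).keys.Nodup := by
    simp [PySem.Dict.keys_empty]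
  have hempfr : ∀ ca ∈ kvs.keys, ∀ aa, (ca, aa) ∉ (PySem.Dict.empty : PySem.Dict (String × String) Int).keys := by
    simp [PySem.Dict.keys_empty]
  have hA := pv_outerA (fun cb => kvs.getD cb "") kvs.keys kvs.keys PySem.Dict.empty hempnd hKnd hempfr
  -- characterize the grouping dict
  set aa2c := kvs.items.foldl (fun g p => g.modify p.2 [] (· ++ [p.1])) PySem.Dict.empty with ha2c
  have haand : aa2c.keys.Nodup := by
    apply PySem.Dict.nodup_keys_foldl_modify_key kvs.items (fun p => p.2) [] (fun g p => (· ++ [p.1]))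
    simp [PySem.Dict.keys_empty]
  have haakeys : aa2c.keys = PySem.Set.ofList (kvs.keys.map (fun cb => kvs.getD cb "")) := by
    rw [ha2c, PySem.Dict.keys_foldl_modify_key kvs.items (fun p => p.2) [] (fun g p => (· ++ [p.1]))]
    rw [PySem.Dict.keys_empty, PySem.Set.update_nil_left]
    congr 1
    have : kvs.items.map (fun p => p.2) = kvs.values := rfl
    rw [this, PySem.Dict.values_eq_map_keys kvs hKnd ""]
  have haaget : ∀ aa, aa2c.getD aa [] = (kvs.keys.filter (fun cb => kvs.getD cb "" == aa)).map (fun k => k) := by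
    intro aa
    rw [ha2c, pv_group_getD, PySem.Dict.getD_empty]
    rw [PySem.Dict.items_eq_map_keys kvs hKnd "", List.filter_map]
    simp [Function.comp_def]
  have haaitems : aa2c.items = aa2c.keys.map (fun aa => (aa, aa2c.getD aa [])) :=
    PySem.Dict.items_eq_map_keys aa2c haand []
  have hB := pv_outerB aa2c.items kvs.keys PySem.Dict.empty hempnd hKnd
    (by rw [show aa2c.items.map (fun q => q.1) = aa2c.keys from rfl]; exact haand) hempfr
  simp only [] at hA hB
  rw [hA, hB]
  simp only [show (PySem.Dict.empty : PySem.Dict (String × String) Int).items = [] from rfl, List.nil_append]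
  have hrow : (fun ca => pvRow ca (fun cb => kvs.getD cb "") kvs.keys)
      = (fun ca => aa2c.items.map (fun q => ((ca, q.1), (PySem.List.min? (q.2.map (fun cb => hamming_distance_alt ca cb)) (fun x => x)).getD 0))) := by
    funext ca
    rw [haaitems, List.map_map, pvRow, ← haakeys]
    apply List.map_congr_left
    intro aa haa
    simp only [Function.comp_def]
    congr 1
    rw [haaget aa, pvGroupMin]
    have hfm : (kvs.keys.filter (fun cb => kvs.getD cb "" == aa)).map (fun cb => hamming_distance ca cb)
        = (kvs.keys.filter (fun cb => kvs.getD cb "" == aa)).map (fun cb => hamming_distance_alt ca cb) :=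
      List.map_congr_left (fun cb _ => pv_hamming_eq' ca cb)
    rw [hfm]
    simp
  rw [hrow]

-- ===== VERDICT (by name: the statement is the Claim_ definition above) =====
theorem get_codon_aa_distance_table_spec : Claim_equal_get_codon_aa_distance_table := by
  intro codon_aa_pairs _
  unfold Spec_get_codon_aa_distance_table
  exact pv_final codon_aa_pairs
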